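-- pv_equiv track=rewrite | github.com/Br4nd0R/advent_21 | day3/2.py | more_ones_or_zeros
-- ===== SOURCE A (Python) =====
-- import typing as T
--
-- def more_ones_or_zeros(digit_idx: int, binary_nums: T.List[str]) -> int:
--     """Returns 1 or 0 depending on which there are more
--     of for the given digit index in the list of binary nums (as strings).
--     Returns None if the number of zeros and ones are the same."""
--     digit_values = [num[digit_idx] for num in binary_nums]
--
--     ones = digit_values.count("1")
--     zeros = digit_values.count("0")
--
--     if ones > zeros:
--         return 1
--     elif zeros > ones:
--         return 0
--     else:
--         return None
-- ===== SOURCE B (Python) =====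
-- def more_ones_or_zeros(digit_idx, binary_nums):
--     """Single pass: keep a signed balance (+1 per '1', -1 per '0') instead of
--     building the digit list and counting it twice."""
--     balance = 0
--     for num in binary_nums:
--         c = num[digit_idx]
--         if c == "1":
--             balance += 1
--         elif c == "0":
--             balance -= 1
--     if balance > 0:
--         return 1
--     if balance < 0:
--         return 0
--     return None
-- ===== Notes on version B (the rewrite author's own statement) =====
-- stated objective: simpler
-- what changed: Replaces the build-list-then-count-twice structure with a single pass maintaining one signed balance (+1 for '1', -1 for '0') whose sign decides the result.
import Mathlib
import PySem

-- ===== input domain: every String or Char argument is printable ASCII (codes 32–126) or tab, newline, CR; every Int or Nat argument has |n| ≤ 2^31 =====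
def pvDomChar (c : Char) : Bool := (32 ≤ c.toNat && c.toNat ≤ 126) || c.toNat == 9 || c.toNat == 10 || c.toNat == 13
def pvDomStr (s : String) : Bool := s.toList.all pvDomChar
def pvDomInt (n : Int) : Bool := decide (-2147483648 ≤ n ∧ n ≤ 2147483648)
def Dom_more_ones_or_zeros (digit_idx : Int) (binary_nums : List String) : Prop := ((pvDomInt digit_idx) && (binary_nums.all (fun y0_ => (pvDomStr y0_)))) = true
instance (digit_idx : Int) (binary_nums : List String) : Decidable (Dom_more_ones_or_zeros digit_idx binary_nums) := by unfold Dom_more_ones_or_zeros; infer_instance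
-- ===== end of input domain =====

-- B replaces A's digit-value list and two .count scans with one pass keeping a signed balance; same return value.
-- ===== PORT A =====
def more_ones_or_zeros (digit_idx : Int) (binary_nums : List String) : Option Int :=
  -- digit_values = [num[digit_idx] for num in binary_nums]; num[digit_idx] raises outside Pre_ (mapM = none there)
  match binary_nums.mapM (fun num => PySem.Str.pyGet? num digit_idx) with
  | none => none
  | some digit_values =>
    let ones := digit_values.count '1'
    let zeros := digit_values.count '0'
    if ones > zeros then some 1
    else if zeros > ones then some 0
    else none

-- ===== PORT B =====
def more_ones_or_zeros_alt (digit_idx : Int) (binary_nums : List String) : Option Int :=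
  let balance : Int := binary_nums.foldl (fun acc num =>
    match PySem.Str.pyGet? num digit_idx with   -- none only outside Pre_ (IndexError in Python)
    | some c => if c = '1' then acc + 1 else if c = '0' then acc - 1 else acc
    | none => acc) 0
  if balance > 0 then some 1
  else if balance < 0 then some 0
  else none

-- ===== PRECONDITION & SPEC =====
-- Pre_ excludes exactly the inputs where num[digit_idx] raises IndexError for some num.
def Pre_more_ones_or_zeros (digit_idx : Int) (binary_nums : List String) : Prop :=
  ∀ num ∈ binary_nums, PySem.Raise.InRange num.toList.length digit_idx
instance (digit_idx : Int) (binary_nums : List String) : Decidable (Pre_more_ones_or_zeros digit_idx binary_nums) := by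
  unfold Pre_more_ones_or_zeros; infer_instance
def pvWitness_more_ones_or_zeros : Int × List String := (1, ["10", "11", "01"])

def Spec_more_ones_or_zeros (digit_idx : Int) (binary_nums : List String) (out : Option Int) : Prop := out = more_ones_or_zeros_alt digit_idx binary_nums
instance (digit_idx : Int) (binary_nums : List String) (out : Option Int) : Decidable (Spec_more_ones_or_zeros digit_idx binary_nums out) := by unfold Spec_more_ones_or_zeros; infer_instance

-- ===== CLAIM (what is proved, stated in full; the proofs are below) =====
def Claim_equal_more_ones_or_zeros : Prop := ∀ (digit_idx : Int) (binary_nums : List String), Dom_more_ones_or_zeros digit_idx binary_nums → Pre_more_ones_or_zeros digit_idx binary_nums → Spec_more_ones_or_zeros digit_idx binary_nums (more_ones_or_zeros digit_idx binary_nums)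

-- ===== LEMMAS AND PROOFS =====

-- B's fold equals (count of '1') - (count of '0') of A's digit_values list, for any accumulator.
theorem balance_eq_counts (g : String → Option Char) (l : List String) (dvs : List Char) (a : Int)
    (h : l.mapM g = some dvs) :
    l.foldl (fun acc num =>
      match g num with
      | some c => if c = '1' then acc + 1 else if c = '0' then acc - 1 else acc
      | none => acc) a = a + (dvs.count '1' : Int) - (dvs.count '0' : Int) := by
  induction l generalizing a dvs with
  | nil => simp_all
  | cons x xs ih =>
    rw [List.mapM_cons] at h
    cases hx : g x with
    | none => simp [hx] at h
    | some c =>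
      cases hxs : xs.mapM g with
      | none => simp [hx, hxs] at h
      | some rest =>
        simp only [hx, hxs] at h
        cases h
        simp only [List.foldl_cons, hx, ih _ _ hxs, List.count_cons]
        by_cases h1 : c = '1' <;> by_cases h0 : c = '0' <;>
          simp_all <;> ring

-- Under Pre_, every num[digit_idx] succeeds, so the comprehension's mapM returns some list.
theorem mapM_isSome (digit_idx : Int) (binary_nums : List String)
    (hpre : Pre_more_ones_or_zeros digit_idx binary_nums) :
    ∃ dvs, binary_nums.mapM (fun num => PySem.Str.pyGet? num digit_idx) = some dvs := by
  induction binary_nums with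
  | nil => exact ⟨[], rfl⟩
  | cons x xs ih =>
    obtain ⟨rest, hrest⟩ := ih (fun n hn => hpre n (List.mem_cons_of_mem _ hn))
    have hx : PySem.Raise.InRange x.toList.length digit_idx := hpre x (List.mem_cons_self)
    have : PySem.Str.pyGet? x digit_idx ≠ none := by
      simp only [PySem.Str.pyGet?_eq, PySem.Chars.pyGet?_eq_listPyGet?]
      rw [Ne, PySem.List.pyGet?_eq_none_iff]
      exact not_not_intro hx
    obtain ⟨c, hc⟩ := Option.ne_none_iff_exists'.mp this
    exact ⟨c :: rest, by rw [List.mapM_cons, hc, hrest]; rfl⟩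

-- ===== VERDICT (by name: the statement is the Claim_ definition above) =====
theorem more_ones_or_zeros_spec : Claim_equal_more_ones_or_zeros := by
  intro digit_idx binary_nums _ hpre
  unfold Spec_more_ones_or_zeros more_ones_or_zeros more_ones_or_zeros_alt
  obtain ⟨dvs, hdvs⟩ := mapM_isSome digit_idx binary_nums hpre
  rw [hdvs, balance_eq_counts _ _ _ _ hdvs]
  simp only [zero_add]
  split_ifs <;> first | rfl | omega
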